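-- pv_equiv track=rewrite | github.com/raeez/chiral-bar-cobar | compute/lib/w3_bar.py | w3_deg3_chain_dim
-- ===== SOURCE A (Python) =====
-- from typing import Dict, List, Tuple
--
-- def _w3_vacuum_dims_table(max_h: int = 20) -> Dict[int, int]:
--     """Compute W₃ vacuum module dimensions via product formula."""
--     coeffs = [0] * (max_h + 1)
--     coeffs[0] = 1
--     for n in range(2, max_h + 1):
--         for i in range(n, max_h + 1):
--             coeffs[i] += coeffs[i - n]
--     for m in range(3, max_h + 1):
--         for i in range(m, max_h + 1):
--             coeffs[i] += coeffs[i - m]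
--     return {h: coeffs[h] for h in range(2, max_h + 1)}
--
-- def w3_deg3_chain_dim(weight: int) -> int:
--     """Chain space dimension of B^3_h(W_3).
--
--     At degree 3, we need triples (A,B,C) with wt(A)+wt(B)+wt(C)=h,
--     each wt >= 2 (minimum weight in W_3 augmentation ideal).
--     Times dim Omega^2(Conf_3) = 2.
--     """
--     if weight < 6:
--         return 0
--     vdims = _w3_vacuum_dims_table()
--     os_dim = 2  # dim Omega^2(C_bar_3)
--     total = 0
--     for h1 in range(2, weight):
--         for h2 in range(2, weight - h1):
--             h3 = weight - h1 - h2
--             if h3 >= 2: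
--                 total += vdims.get(h1, 0) * vdims.get(h2, 0) * vdims.get(h3, 0)
--     return total * os_dim
-- ===== SOURCE B (Python) =====
-- def w3_deg3_chain_dim(weight: int) -> int:
--     """Chain space dimension of B^3_h(W_3), computed by polynomial convolution.
--
--     g is the coefficient array of the W_3 vacuum character restricted to the
--     augmentation ideal (degrees 2..20); the threefold convolution g*g*g counts
--     the weight-h triples in one precomputed array, so a call is a single table
--     lookup instead of a weight-sized double loop; times dim Omega^2(Conf_3) = 2.
--     """
--     c = [0] * 21
--     c[0] = 1
--     for n in range(2, 21):
--         for i in range(n, 21):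
--             c[i] += c[i - n]
--     for m in range(3, 21):
--         for i in range(m, 21):
--             c[i] += c[i - m]
--     g = [0, 0] + c[2:]
--
--     def conv(a, b):
--         r = [0] * (len(a) + len(b) - 1)
--         for i, x in enumerate(a):
--             for j, y in enumerate(b):
--                 r[i + j] += x * y
--         return r
--
--     g3 = conv(conv(g, g), g)
--     if 0 <= weight < len(g3):
--         return g3[weight] * 2
--     return 0
-- ===== Notes on version B (the rewrite author's own statement) =====
-- stated objective: faster
-- what changed: Replaces A's weight-sized double loop over pairs of vacuum-dimension dict lookups by a precomputed threefold polynomial convolution of the fixed degree-20 coefficient array, so a call is a constant-size computation plus one table lookup.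
import Mathlib
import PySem

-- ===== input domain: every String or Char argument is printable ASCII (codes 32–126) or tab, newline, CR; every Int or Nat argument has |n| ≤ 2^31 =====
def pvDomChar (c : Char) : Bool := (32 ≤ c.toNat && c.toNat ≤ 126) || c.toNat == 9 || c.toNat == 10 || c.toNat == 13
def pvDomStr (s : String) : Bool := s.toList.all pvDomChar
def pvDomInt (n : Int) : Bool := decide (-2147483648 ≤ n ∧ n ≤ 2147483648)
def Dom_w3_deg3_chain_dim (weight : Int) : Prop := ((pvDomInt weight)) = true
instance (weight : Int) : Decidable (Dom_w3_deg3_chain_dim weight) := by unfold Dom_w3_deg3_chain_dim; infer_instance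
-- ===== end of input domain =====

-- B replaces A's nested pair-enumeration over the vacuum-dimension dict by a threefold
-- polynomial convolution of a fixed coefficient array, making the per-call work independent
-- of `weight` (objective: faster; a timing run measures the speedup).

-- ===== PORT A =====
-- port of _w3_vacuum_dims_table (list assignments cs[i] = v use List.set: here 0 ≤ i < len, exact)
def w3VacuumDimsTable (max_h : Int) : PySem.Dict Int Int :=
  let coeffs : List Int := List.replicate (max_h + 1).toNat 0
  let coeffs := coeffs.set 0 1
  let coeffs := (PySem.List.pyRange 2 (max_h + 1) 1).foldl (fun cs n =>
    (PySem.List.pyRange n (max_h + 1) 1).foldl (fun cs i =>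
      cs.set i.toNat (PySem.List.pyGetD cs i 0 + PySem.List.pyGetD cs (i - n) 0)) cs) coeffs
  let coeffs := (PySem.List.pyRange 3 (max_h + 1) 1).foldl (fun cs m =>
    (PySem.List.pyRange m (max_h + 1) 1).foldl (fun cs i =>
      cs.set i.toNat (PySem.List.pyGetD cs i 0 + PySem.List.pyGetD cs (i - m) 0)) cs) coeffs
  (PySem.List.pyRange 2 (max_h + 1) 1).foldl
    (fun d h => d.insert h (PySem.List.pyGetD coeffs h 0)) PySem.Dict.empty

def w3_deg3_chain_dim (weight : Int) : Int :=
  if weight < 6 then 0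
  else
    let vdims := w3VacuumDimsTable 20
    let os_dim : Int := 2
    let total : Int := (PySem.List.pyRange 2 weight 1).foldl (fun total h1 =>
      (PySem.List.pyRange 2 (weight - h1) 1).foldl (fun total h2 =>
        let h3 := weight - h1 - h2
        if 2 ≤ h3 then total + vdims.getD h1 0 * vdims.getD h2 0 * vdims.getD h3 0
        else total) total) 0
    total * os_dim

-- ===== PORT B =====
-- Source B's conv helper (r[i+j] += x*y uses List.set: 0 ≤ i+j < len r, exact)
def pvConv (a b : List Int) : List Int :=
  (PySem.List.enumerate a).foldl (fun r ix =>
    (PySem.List.enumerate b).foldl (fun r jy =>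
      r.set (ix.1 + jy.1).toNat (PySem.List.pyGetD r (ix.1 + jy.1) 0 + ix.2 * jy.2)) r)
    (List.replicate (a.length + b.length - 1) (0 : Int))

-- Source B's closed coefficient array g3 (no dependence on weight), hoisted as a helper
-- (list assignments c[i] = v use List.set: here 0 ≤ i < len, exact)
def pvG3 : List Int :=
  let c : List Int := (List.replicate 21 (0 : Int)).set 0 1
  let c := (PySem.List.pyRange 2 21 1).foldl (fun cs n =>
    (PySem.List.pyRange n 21 1).foldl (fun cs i =>
      cs.set i.toNat (PySem.List.pyGetD cs i 0 + PySem.List.pyGetD cs (i - n) 0)) cs) c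
  let c := (PySem.List.pyRange 3 21 1).foldl (fun cs m =>
    (PySem.List.pyRange m 21 1).foldl (fun cs i =>
      cs.set i.toNat (PySem.List.pyGetD cs i 0 + PySem.List.pyGetD cs (i - m) 0)) cs) c
  let g : List Int := [0, 0] ++ PySem.List.slice c (some 2) none
  pvConv (pvConv g g) g

def w3_deg3_chain_dim_alt (weight : Int) : Int :=
  if 0 ≤ weight ∧ weight < (pvG3.length : Int) then PySem.List.pyGetD pvG3 weight 0 * 2
  else 0

-- ===== PRECONDITION & SPEC =====
def Spec_w3_deg3_chain_dim (weight : Int) (out : Int) : Prop := out = w3_deg3_chain_dim_alt weight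
instance (weight : Int) (out : Int) : Decidable (Spec_w3_deg3_chain_dim weight out) := by unfold Spec_w3_deg3_chain_dim; infer_instance

-- ===== CLAIM (what is proved, stated in full; the proofs are below) =====
def Claim_equal_w3_deg3_chain_dim : Prop := ∀ (weight : Int), Dom_w3_deg3_chain_dim weight → Spec_w3_deg3_chain_dim weight (w3_deg3_chain_dim weight)

-- ===== LEMMAS AND PROOFS =====

-- the literal value of B's coefficient array
def pvL : List Int := [0, 0, 0, 0, 0, 0, 1, 6, 21, 56, 135, 300, 630, 1260, 2442, 4576, 8379, 14994, 26351, 45480, 77412, 129868, 215313, 352824, 572390, 915462, 1443129, 2244384, 3453924, 5248590, 7892394, 11737392, 17282499, 25170854, 36324306, 51859116, 73329127, 102603540, 142111965, 194595564, 263512092, 352256808, 464549566, 603013644, 773968539, 982751538, 1233655788, 1525369734, 1864104537, 2238961368, 2646741027, 3067534058, 3480070551, 3839402994, 4114223829, 4227930978, 4129086264, 3749417512, 3062844960, 2068701600, 941192000]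

set_option maxRecDepth 40000 in
set_option maxHeartbeats 4000000 in
lemma pvG3_eq : pvG3 = pvL := by decide

lemma pvB_eq (w : Int) :
    w3_deg3_chain_dim_alt w = if 0 ≤ w ∧ w < 61 then PySem.List.pyGetD pvL w 0 * 2 else 0 := by
  simp only [w3_deg3_chain_dim_alt, pvG3_eq]
  norm_num [pvL]

-- the vacuum-dimension table as a literal dict
def pvT : PySem.Dict Int Int := PySem.Dict.mk [(2, 1), (3, 2), (4, 3), (5, 4), (6, 8), (7, 10), (8, 17), (9, 24), (10, 36), (11, 50), (12, 76), (13, 102), (14, 148), (15, 204), (16, 285), (17, 386), (18, 537), (19, 718), (20, 980)]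

set_option maxRecDepth 40000 in
lemma pvTable_eq : w3VacuumDimsTable 20 = pvT := by decide

-- the inner summand of A's double loop, with the table as its literal
def pvInner (w h1 : Int) : Int → Int → Int := fun total h2 =>
  if 2 ≤ w - h1 - h2 then
    total + pvT.getD h1 0 * pvT.getD h2 0 * pvT.getD (w - h1 - h2) 0
  else total

lemma pvA_eq (w : Int) : w3_deg3_chain_dim w =
    if w < 6 then 0
    else ((PySem.List.pyRange 2 w 1).foldl (fun total h1 =>
      (PySem.List.pyRange 2 (w - h1) 1).foldl (pvInner w h1) total) 0) * 2 := by
  simp only [w3_deg3_chain_dim, pvTable_eq]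
  rfl

lemma pvKeys_vdims : pvT.keys = PySem.List.pyRange 2 21 1 := by decide

-- lookups outside the table's key range 2..20 give the default 0
lemma pvVd_zero (h : Int) (hh : h < 2 ∨ 20 < h) : pvT.getD h 0 = 0 := by
  apply PySem.Dict.getD_of_not_contains
  rw [PySem.Dict.contains_eq_decide_mem_keys, pvKeys_vdims, decide_eq_false_iff_not,
    PySem.List.mem_pyRange_one]
  omega

-- a fold that never changes its accumulator returns it
lemma pvFoldl_fix {α : Type} (l : List α) (f : Int → α → Int) (init : Int)
    (h : ∀ acc x, x ∈ l → f acc x = acc) : l.foldl f init = init := by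
  induction l generalizing init with
  | nil => rfl
  | cons a t ih =>
    simp only [List.foldl_cons]
    rw [h init a (by simp)]
    exact ih init (fun acc x hx => h acc x (by simp [hx]))

-- the inner range [2, w-h1) can be replaced by the fixed range [2, 21):
-- past 20 the table gives 0, past w-h1 the h3 ≥ 2 guard fails
lemma pvInner_ext (w h1 init : Int) :
    (PySem.List.pyRange 2 (w - h1) 1).foldl (pvInner w h1) init =
    (PySem.List.pyRange 2 21 1).foldl (pvInner w h1) init := by
  by_cases hb : w - h1 ≤ 2
  · rw [PySem.List.pyRange_one_eq_nil hb, List.foldl_nil]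
    symm
    apply pvFoldl_fix
    intro acc h2 hm
    rw [PySem.List.mem_pyRange_one] at hm
    unfold pvInner
    rw [if_neg (by omega)]
  · by_cases hb2 : w - h1 ≤ 21
    · symm
      rw [PySem.List.pyRange_one_append 2 (w - h1) 21 (by omega) (by omega), List.foldl_append]
      apply pvFoldl_fix
      intro acc h2 hm
      rw [PySem.List.mem_pyRange_one] at hm
      unfold pvInner
      rw [if_neg (by omega)]
    · rw [PySem.List.pyRange_one_append 2 21 (w - h1) (by omega) (by omega), List.foldl_append]
      apply pvFoldl_fix
      intro acc h2 hm
      rw [PySem.List.mem_pyRange_one] at hm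
      unfold pvInner
      by_cases hg : 2 ≤ w - h1 - h2
      · rw [if_pos hg, pvVd_zero h2 (Or.inr (by omega))]; ring
      · rw [if_neg hg]

-- the inner loop over its fixed range, as one step of the outer loop
def pvOut (w : Int) : Int → Int → Int := fun total h1 =>
  (PySem.List.pyRange 2 21 1).foldl (pvInner w h1) total

-- likewise the outer range [2, w) can be replaced by [2, 21)
lemma pvOuter_ext (w init : Int) :
    (PySem.List.pyRange 2 w 1).foldl (pvOut w) init =
    (PySem.List.pyRange 2 21 1).foldl (pvOut w) init := by
  have hguard : ∀ h1, w ≤ h1 → ∀ acc, pvOut w acc h1 = acc := by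
    intro h1 hh acc
    unfold pvOut
    apply pvFoldl_fix
    intro acc2 h2 hm
    rw [PySem.List.mem_pyRange_one] at hm
    unfold pvInner
    rw [if_neg (by omega)]
  by_cases hb : w ≤ 2
  · rw [PySem.List.pyRange_one_eq_nil hb, List.foldl_nil]
    symm
    apply pvFoldl_fix
    intro acc h1 hm
    rw [PySem.List.mem_pyRange_one] at hm
    exact hguard h1 (by omega) acc
  · by_cases hb2 : w ≤ 21
    · symm
      rw [PySem.List.pyRange_one_append 2 w 21 (by omega) (by omega), List.foldl_append]
      apply pvFoldl_fix
      intro acc h1 hm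
      rw [PySem.List.mem_pyRange_one] at hm
      exact hguard h1 (by omega) acc
    · rw [PySem.List.pyRange_one_append 2 21 w (by omega) (by omega), List.foldl_append]
      apply pvFoldl_fix
      intro acc h1 hm
      rw [PySem.List.mem_pyRange_one] at hm
      unfold pvOut
      apply pvFoldl_fix
      intro acc2 h2 hm2
      rw [PySem.List.mem_pyRange_one] at hm2
      unfold pvInner
      by_cases hg : 2 ≤ w - h1 - h2
      · rw [if_pos hg, pvVd_zero h1 (Or.inr (by omega))]; ring
      · rw [if_neg hg]

-- A's double loop over fixed, weight-independent ranges
lemma pvA_fix (w : Int) (hw : ¬ w < 6) : w3_deg3_chain_dim w =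
    ((PySem.List.pyRange 2 21 1).foldl (fun total h1 =>
      (PySem.List.pyRange 2 21 1).foldl (pvInner w h1) total) 0) * 2 := by
  rw [pvA_eq, if_neg hw]
  congr 1
  have hmid : (PySem.List.pyRange 2 w 1).foldl (fun total h1 =>
      (PySem.List.pyRange 2 (w - h1) 1).foldl (pvInner w h1) total) 0 =
      (PySem.List.pyRange 2 w 1).foldl (pvOut w) 0 :=
    PySem.List.foldl_congr_mem (PySem.List.pyRange 2 w 1) _ (pvOut w) 0
      (fun acc x _ => pvInner_ext w x acc)
  rw [hmid]
  exact pvOuter_ext w 0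

-- beyond the degree bound of g·g·g every admitted triple has h3 > 20, so A sums zeros
lemma pvA_big (w : Int) (hw : 60 < w) : w3_deg3_chain_dim w = 0 := by
  rw [pvA_fix w (by omega)]
  have h0 : (PySem.List.pyRange 2 21 1).foldl (fun total h1 =>
      (PySem.List.pyRange 2 21 1).foldl (pvInner w h1) total) 0 = 0 := by
    apply pvFoldl_fix
    intro acc h1 hm
    rw [PySem.List.mem_pyRange_one] at hm
    apply pvFoldl_fix
    intro acc2 h2 hm2
    rw [PySem.List.mem_pyRange_one] at hm2
    unfold pvInner
    by_cases hg : 2 ≤ w - h1 - h2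
    · rw [if_pos hg, pvVd_zero (w - h1 - h2) (Or.inr (by omega))]; ring
    · rw [if_neg hg]
  rw [h0]; ring

-- on 0 ≤ w ≤ 60 the fixed-range form of A is checked against pvL value by value
set_option maxRecDepth 200000 in
set_option maxHeartbeats 16000000 in
lemma pvChk : ((List.range 61).all (fun n =>
    ((PySem.List.pyRange 2 21 1).foldl (fun total h1 =>
      (PySem.List.pyRange 2 21 1).foldl (pvInner (n : Int) h1) total) 0) * 2 ==
    PySem.List.pyGetD pvL (n : Int) 0 * 2)) = true := by
  decide

lemma pvA_mid (w : Int) (h0 : 0 ≤ w) (h1 : w ≤ 60) :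
    w3_deg3_chain_dim w = PySem.List.pyGetD pvL w 0 * 2 := by
  have hw : w = ((w.toNat : Nat) : Int) := by omega
  have hmem : w.toNat ∈ List.range 61 := by
    rw [List.mem_range]; omega
  have hval := eq_of_beq (List.all_eq_true.mp pvChk _ hmem)
  by_cases h6 : w < 6
  · rw [pvA_eq, if_pos h6]
    interval_cases w <;> decide
  · rw [pvA_fix w h6, hw]
    exact hval

-- ===== VERDICT (by name: the statement is the Claim_ definition above) =====
theorem w3_deg3_chain_dim_spec : Claim_equal_w3_deg3_chain_dim := by
  intro w _
  unfold Spec_w3_deg3_chain_dim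
  rw [pvB_eq]
  by_cases hlo : 0 ≤ w
  · by_cases hhi : w < 61
    · rw [if_pos ⟨hlo, hhi⟩, pvA_mid w hlo (by omega)]
    · rw [if_neg (by omega), pvA_big w (by omega)]
  · rw [if_neg (by omega)]
    unfold w3_deg3_chain_dim
    rw [if_pos (by omega)]
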